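-- pv_equiv track=rewrite | github.com/RoyMN/Python | algorithms/Div/pascal.py | pascal_tree
-- ===== SOURCE A (Python) =====
-- def pascal_tree(n: int, base:int = 1) -> dict:
--
--     """Makes a dictionary where the keys are row-indexes in a pascal-trangle
--     of size n, and the values are the rows as a list. E.g. pascal(3) should
--     return {1 : [1], 2: [1,1], 3: [1,2,1]}.
--
--     pascal(0) should returns an empty dictionary.
--
--     Optional argument 'base=': set an integer as a new base. E.g.
--     pascal(3, base=9) should return {1: [2], 2: [2, 2], 3: [2, 4, 2]}"""
--
--
--     for v in (n,base):
--         assert isinstance(v, int),f'Both n and base must be integers'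
--     if not n:
--         return {}
--     if n == 1:
--         return {1: [base]}
--     else:
--         bottom_row = list()
--         prev_p = pascal_tree(n-1, base)  #Only one recursive call
--         for i in range(0, n):
--             if i == 0:
--                 bottom_row.append(prev_p[n-1][i])
--             elif i == n-1:
--                 bottom_row.append(prev_p[n-1][i-1])
--             else:
--                 bottom_row.append(prev_p[n-1][i-1]+prev_p[n-1][i])
--         bottom_row = {n: bottom_row}
--         pascal_dict = prev_p
--         pascal_dict.update(bottom_row)
--         return pascal_dict
-- ===== SOURCE B (Python) =====
-- def pascal_tree(n: int, base: int = 1) -> dict: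
--     """Iterative Pascal triangle rows keyed 1..n, scaled so row 1 is [base]."""
--     for v in (n, base):
--         assert isinstance(v, int), f'Both n and base must be integers'
--     result = {}
--     row = []
--     for r in range(1, n + 1):
--         if r == 1:
--             row = [base]
--         else:
--             row = [base] + [x + y for x, y in zip(row, row[1:])] + [base]
--         result[r] = row
--     return result
-- ===== Notes on version B (the rewrite author's own statement) =====
-- stated objective: simpler
-- what changed: Replaces the linear recursion with per-element dict lookups (each bottom-row entry re-indexes prev_p[n-1]) by a single iterative loop that keeps the current row as a local list and builds the next row from adjacent pairs via zip.
import Mathlib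
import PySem

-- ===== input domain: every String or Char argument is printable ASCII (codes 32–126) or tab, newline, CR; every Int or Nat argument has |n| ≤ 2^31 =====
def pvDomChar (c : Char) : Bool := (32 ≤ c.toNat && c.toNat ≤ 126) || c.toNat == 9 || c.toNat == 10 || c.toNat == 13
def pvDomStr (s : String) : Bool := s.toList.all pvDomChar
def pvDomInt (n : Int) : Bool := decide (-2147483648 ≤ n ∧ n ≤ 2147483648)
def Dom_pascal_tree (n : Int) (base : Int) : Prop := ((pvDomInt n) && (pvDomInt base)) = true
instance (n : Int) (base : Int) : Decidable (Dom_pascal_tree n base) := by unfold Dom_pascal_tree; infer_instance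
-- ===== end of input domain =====

-- B replaces A's linear recursion (each bottom-row entry re-indexing the previous row through the dict)
-- by one iterative loop keeping the current row locally and zipping adjacent pairs; objective: simpler.


-- ===== PORT A =====
-- A recurses on n-1 with base cases n = 0 and n = 1; the recursion depth is n, so the port
-- recurses on the Nat fuel n.toNat (for n < 0 Python A raises RecursionError: outside Pre_).
-- prev_p[n-1] is ported as getD (the key is always present on the admitted inputs, where
-- Python's [] lookup returns the same value), and the list indexings prev_p[n-1][..] as
-- pyGetD (always in range on the admitted inputs, where Python's [] returns the same value).
def pascalA (base : Int) : Nat → PySem.Dict Int (List Int)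
  | 0 => PySem.Dict.empty
  | 1 => PySem.Dict.empty.insert 1 [base]
  | (m+2) =>
      let n : Int := (m : Int) + 2
      let prev := pascalA base (m+1)
      let prow := prev.getD (n-1) []
      let bottom := (PySem.List.pyRange 0 n 1).map (fun i =>
        if i = 0 then PySem.List.pyGetD prow i 0
        else if i = n - 1 then PySem.List.pyGetD prow (i-1) 0
        else PySem.List.pyGetD prow (i-1) 0 + PySem.List.pyGetD prow i 0)
      prev.insert n bottom

def pascal_tree (n : Int) (base : Int) : List (Int × List Int) :=
  (pascalA base n.toNat).items

-- ===== PORT B =====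
def pascal_tree_alt (n : Int) (base : Int) : List (Int × List Int) :=
  (((PySem.List.pyRange 1 (n+1) 1).foldl
      (fun (st : PySem.Dict Int (List Int) × List Int) r =>
        let row := if r = 1 then [base]
          else [base] ++ ((st.2.zip (PySem.List.slice st.2 (some 1) none)).map (fun p => p.1 + p.2)) ++ [base]
        (st.1.insert r row, row))
      (PySem.Dict.empty, ([] : List Int))).1).items

-- ===== PRECONDITION & SPEC =====
-- Pre_ excludes n < 0, on which Python A recurses without a base case and raises RecursionError.
def Pre_pascal_tree (n : Int) (base : Int) : Prop := 0 ≤ n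
instance (n : Int) (base : Int) : Decidable (Pre_pascal_tree n base) := by unfold Pre_pascal_tree; infer_instance
def pvWitness_pascal_tree : Int × Int := (5, 2)

def Spec_pascal_tree (n : Int) (base : Int) (out : List (Int × List Int)) : Prop := out = pascal_tree_alt n base
instance (n : Int) (base : Int) (out : List (Int × List Int)) : Decidable (Spec_pascal_tree n base out) := by unfold Spec_pascal_tree; infer_instance

-- ===== CLAIM (what is proved, stated in full; the proofs are below) =====
def Claim_equal_pascal_tree : Prop := ∀ (n : Int) (base : Int), Dom_pascal_tree n base → Pre_pascal_tree n base → Spec_pascal_tree n base (pascal_tree n base)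

-- ===== LEMMAS AND PROOFS =====

-- the row B computes from the previous one
def nextRow (base : Int) (row : List Int) : List Int :=
  [base] ++ ((row.zip row.tail).map (fun p => p.1 + p.2)) ++ [base]

-- row k of the triangle (1-based), [] for k = 0
def rowF (base : Int) : Nat → List Int
  | 0 => []
  | 1 => [base]
  | (k+2) => nextRow base (rowF base (k+1))

def rowsF (base : Int) (m : Nat) : List (Int × List Int) :=
  (List.range m).map (fun (k : Nat) => ((((k+1 : Nat)) : Int), rowF base (k+1)))

theorem rowF_length (base : Int) : ∀ k, (rowF base (k+1)).length = k+1 := by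
  intro k
  induction k with
  | zero => rfl
  | succ k ih => simp [rowF, nextRow, List.length_tail, ih]

theorem rowF_head (base : Int) (k : Nat) : (rowF base (k+1)).head? = some base := by
  cases k <;> rfl

theorem rowF_last (base : Int) : ∀ k, (rowF base (k+1)).getLast? = some base := by
  intro k
  cases k with
  | zero => rfl
  | succ k =>
    show (nextRow base (rowF base (k+1))).getLast? = some base
    simp only [nextRow, List.cons_append, List.nil_append]
    rw [← List.cons_append, List.getLast?_concat]

theorem rowF_get_zero (base : Int) (m : Nat) (h : 0 < (rowF base (m+1)).length) :
    (rowF base (m+1))[0] = base := by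
  have hh := rowF_head base m
  rwa [List.head?_eq_getElem?, List.getElem?_eq_getElem h, Option.some_inj] at hh

theorem rowF_get_last (base : Int) (m : Nat) (h : m < (rowF base (m+1)).length) :
    (rowF base (m+1))[m] = base := by
  have hl := rowF_last base m
  rw [List.getLast?_eq_getElem?, rowF_length base m] at hl
  simp only [Nat.add_sub_cancel] at hl
  rwa [List.getElem?_eq_getElem h, Option.some_inj] at hl

theorem bottom_eq (base : Int) (m : Nat) :
    (PySem.List.pyRange 0 ((m : Int) + 2) 1).map (fun i =>
        if i = 0 then PySem.List.pyGetD (rowF base (m+1)) i 0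
        else if i = ((m : Int) + 2) - 1 then PySem.List.pyGetD (rowF base (m+1)) (i-1) 0
        else PySem.List.pyGetD (rowF base (m+1)) (i-1) 0 + PySem.List.pyGetD (rowF base (m+1)) i 0)
      = nextRow base (rowF base (m+1)) := by
  have hlen : (rowF base (m+1)).length = m+1 := rowF_length base m
  have hrange : PySem.List.pyRange 0 ((m : Int) + 2) 1
      = (List.range (m+2)).map (fun k : Nat => (k : Int)) := by
    rw [PySem.List.pyRange_one]
    have h2 : (((m : Int) + 2) - 0).toNat = m + 2 := by omega
    rw [h2]; simp
  rw [hrange, List.map_map]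
  apply List.ext_getElem
  · simp [nextRow, List.length_tail, hlen]
  · intro j h1 h2
    simp only [List.getElem_map, List.getElem_range, Function.comp_apply]
    have hj : j < m + 2 := by simpa using h1
    have hnext : nextRow base (rowF base (m+1))
        = base :: ((((rowF base (m+1)).zip (rowF base (m+1)).tail).map (fun p => p.1 + p.2)) ++ [base]) := by
      simp [nextRow]
    simp only [hnext]
    match j with
    | 0 =>
      have c0 : ((0 : Nat) : Int) = 0 := by norm_num
      rw [c0, if_pos rfl, List.getElem_cons_zero,
          PySem.List.pyGetD_eq_getElem _ _ (by omega) (by omega)]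
      simpa using rowF_get_zero base m (by omega)
    | (i+1) =>
      have hne0 : ((i+1 : Nat) : Int) ≠ 0 := by push_cast; omega
      rw [if_neg hne0, List.getElem_cons_succ]
      by_cases him : i = m
      · subst him
        have heq : ((i+1 : Nat) : Int) = ((i : Int) + 2) - 1 := by push_cast; ring
        rw [if_pos heq]
        have hsum : (((rowF base (i+1)).zip (rowF base (i+1)).tail).map (fun p => p.1 + p.2)).length = i := by
          simp [List.length_tail, hlen]
        rw [List.getElem_append_right (by omega)]
        have hidx : ((i+1 : Nat) : Int) - 1 = ((i : Nat) : Int) := by push_cast; ring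
        rw [hidx, PySem.List.pyGetD_eq_getElem _ _ (by omega) (by omega)]
        simp only [hsum, Nat.sub_self, List.getElem_singleton]
        simpa using rowF_get_last base i (by omega)
      · have him' : i < m := by omega
        have hne1 : ((i+1 : Nat) : Int) ≠ ((m : Int) + 2) - 1 := by push_cast; omega
        rw [if_neg hne1]
        have hsum : (((rowF base (m+1)).zip (rowF base (m+1)).tail).map (fun p => p.1 + p.2)).length = m := by
          simp [List.length_tail, hlen]
        rw [List.getElem_append_left (by omega)]
        have hidx : ((i+1 : Nat) : Int) - 1 = ((i : Nat) : Int) := by push_cast; ring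
        rw [hidx, PySem.List.pyGetD_eq_getElem _ _ (by omega) (by omega),
            PySem.List.pyGetD_eq_getElem _ _ (by omega) (by omega)]
        simp [List.getElem_tail]

theorem rows_not_contains (base : Int) (k : Nat) :
    (PySem.Dict.mk (rowsF base k)).contains ((k : Int) + 1) = false := by
  rw [PySem.Dict.contains_eq_decide_mem_keys]
  simp only [PySem.Dict.keys_mk, rowsF, List.map_map, decide_eq_false_iff_not]
  intro hmem
  simp only [List.mem_map, List.mem_range, Function.comp_apply] at hmem
  obtain ⟨j, hjk, hje⟩ := hmem
  omega

theorem mk_insert_rows (base : Int) (k : Nat) :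
    (PySem.Dict.mk (rowsF base k)).insert ((k : Int) + 1) (rowF base (k+1))
      = PySem.Dict.mk (rowsF base (k+1)) := by
  apply PySem.Dict.ext
  rw [PySem.Dict.items_insert_of_not_contains _ _ (rows_not_contains base k)]
  show _ = rowsF base (k+1)
  simp only [rowsF, List.range_succ, List.map_append, List.map_cons, List.map_nil]
  push_cast
  rfl

theorem rows_nodup_keys (base : Int) (k : Nat) :
    (PySem.Dict.mk (rowsF base k)).keys.Nodup := by
  simp only [PySem.Dict.keys_mk, rowsF, List.map_map]
  refine List.Nodup.map ?_ List.nodup_range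
  intro a b h
  simp only [Function.comp_apply] at h
  omega

theorem mk_getD_rows (base : Int) (k : Nat) :
    (PySem.Dict.mk (rowsF base (k+1))).getD ((k : Int) + 1) [] = rowF base (k+1) := by
  have hcast : ((k : Int) + 1) = ((k+1 : Nat) : Int) := by push_cast; ring
  rw [hcast]
  apply PySem.Dict.getD_of_mem_items
  · simp only [rowsF, List.mem_map, List.mem_range]
    exact ⟨k, by omega, rfl⟩
  · exact rows_nodup_keys base (k+1)

theorem pascalA_eq (base : Int) : ∀ m, pascalA base m = PySem.Dict.mk (rowsF base m) := by
  intro m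
  induction m with
  | zero => apply PySem.Dict.ext; simp [pascalA, rowsF, PySem.Dict.empty]
  | succ k ih =>
    cases k with
    | zero =>
      show PySem.Dict.empty.insert 1 [base] = _
      have h := mk_insert_rows base 0
      simpa [rowsF, rowF, PySem.Dict.empty] using h
    | succ k =>
      show pascalA base (k+2) = _
      simp only [pascalA]
      rw [ih]
      have hget : (PySem.Dict.mk (rowsF base (k+1))).getD (((k : Int) + 2) - 1) [] = rowF base (k+1) := by
        have h1 : ((k : Int) + 2) - 1 = (k : Int) + 1 := by ring
        rw [h1]; exact mk_getD_rows base k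
      rw [hget, bottom_eq base k]
      have h2 : ((k : Int) + 2) = (((k+1 : Nat)) : Int) + 1 := by push_cast; ring
      have h3 : nextRow base (rowF base (k+1)) = rowF base (k+2) := rfl
      rw [h2, h3]
      exact mk_insert_rows base (k+1)

theorem foldB_eq (base : Int) : ∀ m : Nat,
    ((PySem.List.pyRange 1 ((m : Int) + 1) 1).foldl
      (fun (st : PySem.Dict Int (List Int) × List Int) r =>
        let row := if r = 1 then [base]
          else [base] ++ ((st.2.zip (PySem.List.slice st.2 (some 1) none)).map (fun p => p.1 + p.2)) ++ [base]
        (st.1.insert r row, row))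
      (PySem.Dict.empty, ([] : List Int)))
    = (PySem.Dict.mk (rowsF base m), rowF base m) := by
  intro m
  induction m with
  | zero =>
    have h : ((0 : Nat) : Int) + 1 = 1 := by norm_num
    have h2 : PySem.List.pyRange 1 1 1 = [] := by rw [PySem.List.pyRange_one]; norm_num
    rw [h, h2]
    simp only [List.foldl_nil]
    refine Prod.ext ?_ rfl
    apply PySem.Dict.ext
    simp [rowsF, PySem.Dict.empty]
  | succ k ih =>
    have hcast : ((k+1 : Nat) : Int) + 1 = ((k : Int) + 1) + 1 := by push_cast; ring
    rw [hcast, PySem.List.pyRange_one_succ_right (by omega), List.foldl_append, ih]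
    simp only [List.foldl_cons, List.foldl_nil, PySem.List.slice_from_one]
    cases k with
    | zero =>
      have hc : ((0 : Nat) : Int) + 1 = 1 := by norm_num
      rw [hc, if_pos rfl]
      refine Prod.ext ?_ rfl
      have h := mk_insert_rows base 0
      have hc2 : ((0 : Nat) : Int) + 1 = 1 := by norm_num
      rw [hc2] at h
      exact congrArg Prod.fst (congrArg (fun d => (d, rowF base 1)) h) |>.trans rfl
    | succ j =>
      rw [if_neg (by push_cast; omega)]
      have hrow : ([base] ++ ((((rowF base (j+1)).zip (rowF base (j+1)).tail).map (fun p => p.1 + p.2)) ++ [base])) = rowF base (j+2) := rfl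
      have h := mk_insert_rows base (j+1)
      refine Prod.ext ?_ ?_
      · show (PySem.Dict.mk (rowsF base (j+1))).insert (((j+1 : Nat) : Int) + 1) (rowF base (j+2)) = PySem.Dict.mk (rowsF base (j+2))
        exact h
      · exact hrow

-- ===== VERDICT (by name: the statement is the Claim_ definition above) =====
theorem pascal_tree_spec : Claim_equal_pascal_tree := by
  intro n base _ hpre
  unfold Spec_pascal_tree pascal_tree pascal_tree_alt
  have hn : n = (n.toNat : Int) := (Int.toNat_of_nonneg hpre).symm
  rw [hn, pascalA_eq, foldB_eq]
  simp
  congr 1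
  omega
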